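-- pv_equiv track=rewrite | github.com/Vettel12/greedy-algorithms | E.py | solution
-- ===== SOURCE A (Python) =====
-- def solution(n, cookies, m, size_cookies):
--     count = 0
--     set_size_cookies = set(size_cookies)
--     for i in range(n):
--         if cookies[i] in set_size_cookies:
--             count += 1
--             set_size_cookies.remove(cookies[i])
--     return count
-- ===== SOURCE B (Python) =====
-- def solution(n, cookies, m, size_cookies):
--     wanted = set(size_cookies)
--     chosen = set()
--     for i in range(n):
--         chosen.add(cookies[i])
--     return len(chosen & wanted)
-- ===== Notes on version B (the rewrite author's own statement) =====
-- stated objective: simpler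
-- what changed: A's single pass that tests membership, removes the hit from the size-set and increments a counter is replaced by building the set of the first n cookies and returning the size of its intersection with set(size_cookies).
import Mathlib
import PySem

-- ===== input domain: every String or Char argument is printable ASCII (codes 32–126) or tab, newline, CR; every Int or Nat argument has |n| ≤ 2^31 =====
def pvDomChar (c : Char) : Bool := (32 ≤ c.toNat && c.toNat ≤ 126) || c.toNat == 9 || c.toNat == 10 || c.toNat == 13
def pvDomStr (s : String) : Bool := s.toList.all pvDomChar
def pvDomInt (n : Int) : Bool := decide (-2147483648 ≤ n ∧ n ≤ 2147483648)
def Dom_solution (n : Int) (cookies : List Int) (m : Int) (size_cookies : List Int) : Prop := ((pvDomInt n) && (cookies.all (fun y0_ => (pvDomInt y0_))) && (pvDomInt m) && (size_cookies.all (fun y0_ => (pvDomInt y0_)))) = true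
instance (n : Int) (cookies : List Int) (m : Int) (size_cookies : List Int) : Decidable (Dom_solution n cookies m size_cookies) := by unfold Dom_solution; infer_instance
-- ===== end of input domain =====

-- B replaces A's single pass (membership test + remove + counter) by building the set of the
-- first n cookies and returning the size of its intersection with set(size_cookies); objective: simpler.

-- ===== PORT A =====
def solution (n : Int) (cookies : List Int) (m : Int) (size_cookies : List Int) : Int :=
  ((PySem.List.pyRange 0 n 1).foldl
    (fun (st : Int × PySem.Set Int) (i : Int) =>
      match PySem.List.pyGet? cookies i with
      | none => st                      -- unreachable under Pre_ (Python raises IndexError)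
      | some c =>
        if PySem.Set.contains st.2 c then
          match PySem.Set.remove? st.2 c with
          | some s' => (st.1 + 1, s')
          | none => st                  -- unreachable: contains holds
        else st)
    (0, PySem.Set.ofList size_cookies)).1

-- ===== PORT B =====
def solution_alt (n : Int) (cookies : List Int) (m : Int) (size_cookies : List Int) : Int :=
  let wanted : PySem.Set Int := PySem.Set.ofList size_cookies
  let chosen : PySem.Set Int :=
    (PySem.List.pyRange 0 n 1).foldl
      (fun (s : PySem.Set Int) (i : Int) =>
        match PySem.List.pyGet? cookies i with
        | none => s                     -- unreachable under Pre_ (Python raises IndexError)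
        | some c => PySem.Set.add s c)
      PySem.Set.empty
  PySem.Set.len (PySem.Set.inter chosen wanted)

-- ===== PRECONDITION & SPEC =====
-- Pre_ excludes exactly n > len(cookies), where both Pythons raise IndexError at cookies[i].
def Pre_solution (n : Int) (cookies : List Int) (m : Int) (size_cookies : List Int) : Prop :=
  n ≤ (cookies.length : Int)
instance (n : Int) (cookies : List Int) (m : Int) (size_cookies : List Int) : Decidable (Pre_solution n cookies m size_cookies) := by unfold Pre_solution; infer_instance
def pvWitness_solution : Int × List Int × Int × List Int := (3, [1, 2, 2], 2, [2, 3])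
def Spec_solution (n : Int) (cookies : List Int) (m : Int) (size_cookies : List Int) (out : Int) : Prop := out = solution_alt n cookies m size_cookies
instance (n : Int) (cookies : List Int) (m : Int) (size_cookies : List Int) (out : Int) : Decidable (Spec_solution n cookies m size_cookies out) := by unfold Spec_solution; infer_instance

-- ===== CLAIM (what is proved, stated in full; the proofs are below) =====
def Claim_equal_solution : Prop := ∀ (n : Int) (cookies : List Int) (m : Int) (size_cookies : List Int), Dom_solution n cookies m size_cookies → Pre_solution n cookies m size_cookies → Spec_solution n cookies m size_cookies (solution n cookies m size_cookies)

-- ===== LEMMAS AND PROOFS =====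

-- Both loops run i over range(n) and only use cookies[i]: under n ≤ len(cookies) they are
-- folds of the value-level step f over the first n cookies.
theorem pv_fold_values {σ : Type} (f : σ → Int → σ) (cookies : List Int) (init : σ)
    (n : Int) (h : n ≤ (cookies.length : Int)) :
    (PySem.List.pyRange 0 n 1).foldl
      (fun st i => match PySem.List.pyGet? cookies i with
        | none => st
        | some c => f st c) init
    = (cookies.take n.toNat).foldl f init := by
  by_cases hn : n ≤ 0
  · have h1 : PySem.List.pyRange 0 n 1 = [] := by
      simp [PySem.List.pyRange]; omega
    have h2 : n.toNat = 0 := by omega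
    simp [h1, h2]
  · obtain ⟨k, hk⟩ : ∃ k : Nat, n = (k : Int) := ⟨n.toNat, by omega⟩
    subst hk
    have hkl : k ≤ cookies.length := by exact_mod_cast h
    clear h hn
    rw [PySem.List.pyRange_zero_natCast, List.foldl_map, Int.toNat_natCast]
    induction k generalizing init with
    | zero => simp
    | succ k ih =>
      have hk' : k ≤ cookies.length := Nat.le_of_succ_le hkl
      rw [List.range_succ, List.foldl_append, ih init hk', List.take_add_one, List.foldl_append]
      have : cookies[k]? = some cookies[k] := List.getElem?_eq_getElem (by omega)
      simp [PySem.List.pyGet?_natCast, this]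

-- A's counter over a list of values vs, started at (c, S), ends at c + |set(vs) ∩ S|.
-- contains after Python's set.remove/discard, as a Boolean conjunction
theorem pv_contains_discard (S : PySem.Set Int) (a v : Int) :
    PySem.Set.contains (List.filter (fun y => !y == v) S) a
      = (!(a == v) && PySem.Set.contains S a) := by
  by_cases hav : a = v
  · subst hav; simp [PySem.Set.contains]
  · simp [PySem.Set.contains, hav]

-- A's counter over a list of values vs, started at (c, S), ends at c + |set(vs) ∩ S|.
theorem pv_countA (vs : List Int) (c : Int) (S : PySem.Set Int) :
    (vs.foldl
      (fun (st : Int × PySem.Set Int) (v : Int) =>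
        if PySem.Set.contains st.2 v then
          match PySem.Set.remove? st.2 v with
          | some s' => (st.1 + 1, s')
          | none => st
        else st) (c, S)).1
    = c + ((PySem.Set.inter (PySem.Set.ofList vs) S).length : Int) := by
  have hstep : (fun (st : Int × PySem.Set Int) (v : Int) =>
        if PySem.Set.contains st.2 v then
          match PySem.Set.remove? st.2 v with
          | some s' => (st.1 + 1, s')
          | none => st
        else st)
      = fun (st : Int × PySem.Set Int) (v : Int) =>
          if PySem.Set.contains st.2 v then (st.1 + 1, st.2.discard v) else st := by
    funext st v
    by_cases h : PySem.Set.contains st.2 v = true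
    · rw [if_pos h, if_pos h]
      simp only [PySem.Set.remove?, if_pos h]
    · rw [if_neg h, if_neg h]
  rw [hstep]
  induction vs generalizing c S with
  | nil => simp [PySem.Set.ofList, PySem.Set.inter]
  | cons v tl ih =>
    rw [PySem.Set.ofList_cons]
    by_cases hv : PySem.Set.contains S v = true
    · simp only [List.foldl_cons, hv, if_pos]
      rw [ih]
      have hlist : PySem.Set.inter (PySem.Set.ofList tl) (S.discard v)
          = List.filter (fun x => PySem.Set.contains S x) ((PySem.Set.ofList tl).discard v) := by
        simp only [PySem.Set.inter, PySem.Set.discard, List.filter_filter]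
        apply List.filter_congr
        intro a _
        rw [pv_contains_discard]
        exact Bool.and_comm _ _
      have hrhs : PySem.Set.inter (v :: (PySem.Set.ofList tl).discard v) S
          = v :: List.filter (fun x => PySem.Set.contains S x) ((PySem.Set.ofList tl).discard v) := by
        have hvm : v ∈ S := by simpa [PySem.Set.contains] using hv
        simp [PySem.Set.inter, hvm]
      rw [hlist, hrhs, List.length_cons]
      push_cast
      ring
    · simp only [List.foldl_cons, hv, if_neg, Bool.false_eq_true, not_false_iff]
      rw [ih]
      have hvf : PySem.Set.contains S v = false := by
        simp only [Bool.not_eq_true] at hv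
        exact hv
      have hlist : PySem.Set.inter (PySem.Set.ofList tl) S
          = List.filter (fun x => PySem.Set.contains S x) ((PySem.Set.ofList tl).discard v) := by
        simp only [PySem.Set.inter, PySem.Set.discard, List.filter_filter]
        apply List.filter_congr
        intro a _
        by_cases hav : a = v
        · subst hav
          have hvm : a ∉ S := by simpa [PySem.Set.contains] using hv
          simp [PySem.Set.contains, hvm]
        · simp [hav]
      have hrhs : PySem.Set.inter (v :: (PySem.Set.ofList tl).discard v) S
          = List.filter (fun x => PySem.Set.contains S x) ((PySem.Set.ofList tl).discard v) := by
        have hvm : v ∉ S := by simpa [PySem.Set.contains] using hv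
        simp [PySem.Set.inter, hvm]
      rw [hrhs, hlist]

-- ===== VERDICT (by name: the statement is the Claim_ definition above) =====
theorem solution_spec : Claim_equal_solution := by
  intro n cookies m size_cookies _ hpre
  unfold Spec_solution solution solution_alt
  rw [pv_fold_values (f := fun (st : Int × PySem.Set Int) (c : Int) =>
        if PySem.Set.contains st.2 c then
          match PySem.Set.remove? st.2 c with
          | some s' => (st.1 + 1, s')
          | none => st
        else st) cookies _ n hpre,
      pv_fold_values (f := PySem.Set.add) cookies _ n hpre,
      pv_countA]
  rw [show (cookies.take n.toNat).foldl PySem.Set.add PySem.Set.empty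
        = PySem.Set.ofList (cookies.take n.toNat) from (PySem.Set.ofList_eq_foldl _).symm]
  simp [PySem.Set.len]
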